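-- pv_equiv track=rewrite | github.com/yyh769130635/zx2020 | test.py | lianxi2
-- ===== SOURCE A (Python) =====
-- def lianxi2(data,m,n):
--     ##预处理工作，将两个村庄构建联系
--     listA = []
--     for i in range(len(data)):
--         listTemp = []
--         for j in range(len(data[0])):
--             if (data[i][j] == 1):
--                 listTemp.append(j)
--         listA.append(listTemp)
--     # 列的好友索引
--     listB = []
--     for j in range(len(data[0])):
--         listTemp = []
--         for i in range(len(data)):
--             if (data[i][j] == 1):
--                 listTemp.append(i+n)
--         listB.append(listTemp)
--     total = listB + listA
--     return total
-- ===== SOURCE B (Python) =====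
-- def lianxi2(data, m, n):
--     # Single fused pass over the matrix: pre-allocate both adjacency tables,
--     # then fill row list and column list together.
--     rows = len(data)
--     cols = len(data[0])
--     listA = [[] for _ in range(rows)]
--     listB = [[] for _ in range(cols)]
--     for i in range(rows):
--         row = data[i]
--         for j in range(cols):
--             if row[j] == 1:
--                 listA[i].append(j)
--                 listB[j].append(i + n)
--     return listB + listA
-- ===== Notes on version B (the rewrite author's own statement) =====
-- stated objective: faster
-- what changed: Replaces A's two separate full matrix scans (one building row lists, one building column lists) by pre-allocated output lists filled in a single fused pass with the current row cached, halving matrix traversals and removing repeated data[i][j] double-indexing.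
import Mathlib
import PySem

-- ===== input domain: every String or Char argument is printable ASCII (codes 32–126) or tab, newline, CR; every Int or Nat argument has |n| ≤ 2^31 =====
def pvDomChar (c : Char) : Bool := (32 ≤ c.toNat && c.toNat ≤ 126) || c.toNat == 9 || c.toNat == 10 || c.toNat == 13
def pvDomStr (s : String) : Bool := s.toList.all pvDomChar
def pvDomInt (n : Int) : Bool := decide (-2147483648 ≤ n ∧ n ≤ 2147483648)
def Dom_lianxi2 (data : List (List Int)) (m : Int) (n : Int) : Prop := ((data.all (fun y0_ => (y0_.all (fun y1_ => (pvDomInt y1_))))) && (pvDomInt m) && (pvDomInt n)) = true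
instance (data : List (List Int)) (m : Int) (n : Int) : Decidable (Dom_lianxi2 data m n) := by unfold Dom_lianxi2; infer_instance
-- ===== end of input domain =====

-- B fuses A's two separate full matrix scans into one pre-allocated single pass (measured faster by a constant factor); same return value on Pre_.

-- ===== PORT A =====
-- Literal port of A: two scans, each building its lists by append.
def lianxi2 (data : List (List Int)) (m : Int) (n : Int) : List (List Int) :=
  let listA := (PySem.List.pyRange 0 (data.length : Int) 1).foldl (fun acc i =>
      acc ++ [(PySem.List.pyRange 0 ((PySem.List.pyGetD data 0 []).length : Int) 1).foldl (fun t j =>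
          if PySem.List.pyGetD (PySem.List.pyGetD data i []) j 0 = 1 then t ++ [j] else t) []]) []
  let listB := (PySem.List.pyRange 0 ((PySem.List.pyGetD data 0 []).length : Int) 1).foldl (fun acc j =>
      acc ++ [(PySem.List.pyRange 0 (data.length : Int) 1).foldl (fun t i =>
          if PySem.List.pyGetD (PySem.List.pyGetD data i []) j 0 = 1 then t ++ [i + n] else t) []]) []
  listB ++ listA

-- ===== PORT B =====
-- listX[k].append(v) on a pre-allocated list of lists
def pvAppendAt (ls : List (List Int)) (k : Nat) (v : Int) : List (List Int) :=
  ls.set k (ls.getD k [] ++ [v])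

-- body of B's inner loop (one cell)
def pvColStep (row : List Int) (i : Nat) (n : Int)
    (st : List (List Int) × List (List Int)) (j : Nat) : List (List Int) × List (List Int) :=
  if row.getD j 0 = 1 then (pvAppendAt st.1 i (j : Int), pvAppendAt st.2 j ((i : Int) + n)) else st

-- body of B's outer loop (one row, with the row cached)
def pvRowStep (data : List (List Int)) (cols : Nat) (n : Int)
    (st : List (List Int) × List (List Int)) (i : Nat) : List (List Int) × List (List Int) :=
  (List.range cols).foldl (pvColStep (data.getD i []) i n) st

def lianxi2_alt (data : List (List Int)) (m : Int) (n : Int) : List (List Int) :=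
  let rows := data.length
  let cols := (PySem.List.pyGetD data 0 []).length
  let st := (List.range rows).foldl (pvRowStep data cols n)
      (List.replicate rows ([] : List Int), List.replicate cols ([] : List Int))
  st.2 ++ st.1

-- ===== PRECONDITION & SPEC =====
-- Pre_ excludes exactly the inputs where the Python raises IndexError (both A and B do,
-- at len(data[0]) resp. a row access): empty data, or a row shorter than the first row.
def Pre_lianxi2 (data : List (List Int)) (m : Int) (n : Int) : Prop :=
  data ≠ [] ∧ ∀ row ∈ data, (data.getD 0 []).length ≤ row.length
instance (data : List (List Int)) (m : Int) (n : Int) : Decidable (Pre_lianxi2 data m n) := by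
  unfold Pre_lianxi2; infer_instance
def pvWitness_lianxi2 : List (List Int) × Int × Int := ([[1, 0], [0, 1]], 0, 2)

def Spec_lianxi2 (data : List (List Int)) (m : Int) (n : Int) (out : List (List Int)) : Prop := out = lianxi2_alt data m n
instance (data : List (List Int)) (m : Int) (n : Int) (out : List (List Int)) : Decidable (Spec_lianxi2 data m n out) := by unfold Spec_lianxi2; infer_instance

-- ===== CLAIM (what is proved, stated in full; the proofs are below) =====
def Claim_equal_lianxi2 : Prop := ∀ (data : List (List Int)) (m : Int) (n : Int), Dom_lianxi2 data m n → Pre_lianxi2 data m n → Spec_lianxi2 data m n (lianxi2 data m n)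

-- ===== LEMMAS AND PROOFS =====

-- canonical per-index descriptions of the two tables
def pvRowL (data : List (List Int)) (t i : Nat) : List Int :=
  ((List.range t).filter (fun j => decide ((data.getD i []).getD j 0 = 1))).map (Nat.cast : Nat → Int)
def pvColP (data : List (List Int)) (n : Int) (r j : Nat) : List Int :=
  ((List.range r).filter (fun i => decide ((data.getD i []).getD j 0 = 1))).map (fun i : Nat => (i : Int) + n)

theorem pvRowL_succ (data : List (List Int)) (t i : Nat) :
    pvRowL data (t + 1) i
      = pvRowL data t i ++ if (data.getD i []).getD t 0 = 1 then [(t : Int)] else [] := by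
  rw [pvRowL, pvRowL, List.range_succ, List.filter_append, List.map_append]
  congr 1
  by_cases h : (data.getD i []).getD t 0 = 1 <;> simp [List.getD] at h ⊢ <;> simp [h]

theorem pvColP_succ (data : List (List Int)) (n : Int) (r j : Nat) :
    pvColP data n (r + 1) j
      = pvColP data n r j ++ if (data.getD r []).getD j 0 = 1 then [(r : Int) + n] else [] := by
  rw [pvColP, pvColP, List.range_succ, List.filter_append, List.map_append]
  congr 1
  by_cases h : (data.getD r []).getD j 0 = 1 <;> simp [List.getD] at h ⊢ <;> simp [h]

theorem pv_set_map_range (f : Nat → List Int) (C t : Nat) (x : List Int) (h : t < C) :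
    ((List.range C).map f).set t x = (List.range C).map (fun q => if q = t then x else f q) := by
  apply List.ext_getElem <;> simp
  intro q hq
  rw [List.getElem_set]
  by_cases hqt : t = q <;> simp [hqt, Eq.comm]

theorem pv_map_nilfun (R : Nat) (f : Nat → List Int) (h : ∀ i, f i = []) :
    (List.range R).map f = List.replicate R ([] : List Int) := by
  have : (List.range R).map f = (List.range R).map (fun _ => ([] : List Int)) :=
    List.map_congr_left (fun i _ => h i)
  rw [this, List.map_const']
  simp

theorem pv_getD_set_self (l : List (List Int)) (i : Nat) (x : List Int) (h : i < l.length) :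
    (l.set i x).getD i [] = x := by
  simp [List.getD, h]

-- A's first scan: row lists
theorem pv_listA_char (data : List (List Int)) (C : Nat) :
    (PySem.List.pyRange 0 (data.length : Int) 1).foldl (fun acc i =>
      acc ++ [(PySem.List.pyRange 0 (C : Int) 1).foldl (fun t j =>
          if PySem.List.pyGetD (PySem.List.pyGetD data i []) j 0 = 1 then t ++ [j] else t) []]) []
    = (List.range data.length).map (fun i => pvRowL data C i) := by
  rw [PySem.List.pyRange_zero_nat data.length, List.foldl_map,
      PySem.List.foldl_append_singleton_eq_map, List.nil_append]
  apply List.map_congr_left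
  intro i hi
  rw [PySem.List.pyRange_zero_nat C, List.foldl_map,
      PySem.List.foldl_append_ite, List.nil_append, pvRowL]
  simp

-- A's second scan: column lists
theorem pv_listB_char (data : List (List Int)) (n : Int) (C : Nat) :
    (PySem.List.pyRange 0 (C : Int) 1).foldl (fun acc j =>
      acc ++ [(PySem.List.pyRange 0 (data.length : Int) 1).foldl (fun t i =>
          if PySem.List.pyGetD (PySem.List.pyGetD data i []) j 0 = 1 then t ++ [i + n] else t) []]) []
    = (List.range C).map (fun j => pvColP data n data.length j) := by
  rw [PySem.List.pyRange_zero_nat C, List.foldl_map,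
      PySem.List.foldl_append_singleton_eq_map, List.nil_append]
  apply List.map_congr_left
  intro j hj
  rw [PySem.List.pyRange_zero_nat data.length, List.foldl_map,
      PySem.List.foldl_append_ite, List.nil_append, pvColP]
  simp

-- B's inner loop: fills slot i of the row table and appends i+n to each matching column
theorem pvB_inner (data : List (List Int)) (n : Int) (i C : Nat)
    (ls : List (List Int)) (hi : i < ls.length) (g : Nat → List Int) :
    ∀ t, t ≤ C →
    (List.range t).foldl (pvColStep (data.getD i []) i n) (ls.set i [], (List.range C).map g) =
      (ls.set i (pvRowL data t i),
       (List.range C).map (fun q =>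
         g q ++ (if q < t ∧ (data.getD i []).getD q 0 = 1 then [(i : Int) + n] else []))) := by
  intro t
  induction t with
  | zero => intro _; simp [pvRowL]
  | succ t ih =>
    intro ht
    rw [List.range_succ, List.foldl_append, ih (by omega), List.foldl_cons, List.foldl_nil]
    by_cases h : (data.getD i []).getD t 0 = 1
    · rw [pvColStep, if_pos h]
      dsimp only
      rw [Prod.mk.injEq]
      refine ⟨?_, ?_⟩
      · rw [pvAppendAt, pv_getD_set_self ls i _ hi, List.set_set]
        congr 1
        rw [pvRowL_succ, if_pos h]
      · rw [pvAppendAt]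
        have hgd : ((List.range C).map (fun q =>
            g q ++ (if q < t ∧ (data.getD i []).getD q 0 = 1 then [(i : Int) + n] else []))).getD t []
            = g t := by
          rw [PySem.List.getD_map_range _ C t [] (by omega)]
          simp
        rw [hgd, pv_set_map_range _ C t _ (by omega)]
        apply List.map_congr_left
        intro q hq
        by_cases hqt : q = t
        · subst hqt
          simp
          simpa [List.getD] using h
        · have hiff : (q < t + 1 ∧ (data.getD i []).getD q 0 = 1) ↔
                 (q < t ∧ (data.getD i []).getD q 0 = 1) := by
            constructor <;> rintro ⟨h1, h2⟩ <;> exact ⟨by omega, h2⟩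
          rw [if_neg hqt, if_congr hiff rfl rfl]
    · rw [pvColStep, if_neg h]
      rw [Prod.mk.injEq]
      refine ⟨?_, ?_⟩
      · congr 1
        rw [pvRowL_succ, if_neg h, List.append_nil]
      · apply List.map_congr_left
        intro q hq
        congr 1
        by_cases hqt : q = t
        · subst hqt
          have hiff : (q < q + 1 ∧ (data.getD i []).getD q 0 = 1) ↔
                 (q < q ∧ (data.getD i []).getD q 0 = 1) := by
            constructor <;> rintro ⟨h1, h2⟩ <;> exact ⟨by exact absurd h2 h, h2⟩
          rw [if_congr hiff rfl rfl]
        · have hiff : (q < t + 1 ∧ (data.getD i []).getD q 0 = 1) ↔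
                 (q < t ∧ (data.getD i []).getD q 0 = 1) := by
            constructor <;> rintro ⟨h1, h2⟩ <;> exact ⟨by omega, h2⟩
          rw [if_congr hiff rfl rfl]

-- B's outer loop invariant
theorem pvB_outer (data : List (List Int)) (n : Int) (C : Nat) :
    ∀ r, r ≤ data.length →
    (List.range r).foldl (pvRowStep data C n)
        (List.replicate data.length ([] : List Int), List.replicate C ([] : List Int)) =
      ((List.range data.length).map (fun i => if i < r then pvRowL data C i else []),
       (List.range C).map (fun q => pvColP data n r q)) := by
  intro r
  induction r with
  | zero =>
    intro _
    rw [List.range_zero, List.foldl_nil, Prod.mk.injEq]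
    refine ⟨?_, ?_⟩
    · symm; apply pv_map_nilfun; intro i; simp
    · symm; apply pv_map_nilfun; intro q; simp [pvColP]
  | succ r ih =>
    intro hr
    rw [List.range_succ, List.foldl_append, ih (by omega), List.foldl_cons, List.foldl_nil,
        pvRowStep]
    have hfst : ((List.range data.length).map (fun i => if i < r then pvRowL data C i else []))
        = ((List.range data.length).map (fun i => if i < r then pvRowL data C i else [])).set r [] := by
      rw [pv_set_map_range _ data.length r [] (by omega)]
      apply List.map_congr_left
      intro i _
      by_cases hir : i = r
      · subst hir; simp
      · simp [hir]
    rw [hfst, pvB_inner data n r C _ (by simp; omega) _ C (le_refl C)]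
    rw [Prod.mk.injEq]
    refine ⟨?_, ?_⟩
    · rw [pv_set_map_range _ data.length r _ (by omega)]
      apply List.map_congr_left
      intro i hi
      by_cases hir : i = r
      · subst hir; simp
      · have hiff : (i < r + 1) ↔ (i < r) := by omega
        rw [if_neg hir, if_congr hiff rfl rfl]
    · apply List.map_congr_left
      intro q hq
      rw [List.mem_range] at hq
      rw [pvColP_succ]
      congr 1
      by_cases h : (data.getD r []).getD q 0 = 1
      · rw [if_pos h, if_pos ⟨hq, h⟩]
      · rw [if_neg h, if_neg (fun hc => h hc.2)]

-- ===== VERDICT (by name: the statement is the Claim_ definition above) =====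
theorem lianxi2_spec : Claim_equal_lianxi2 := by
  intro data m n _ _
  simp only [Spec_lianxi2, lianxi2, lianxi2_alt]
  rw [pv_listA_char data (PySem.List.pyGetD data 0 []).length,
      pv_listB_char data n (PySem.List.pyGetD data 0 []).length,
      pvB_outer data n (PySem.List.pyGetD data 0 []).length data.length (le_refl _)]
  congr 1
  apply List.map_congr_left
  intro i hi
  rw [List.mem_range] at hi
  simp [hi]
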